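-- pv_equiv track=rewrite | github.com/TheJim123/OPDM-vaje | Vaje5/Hiperkocke.py | najpoti
-- ===== SOURCE A (Python) =====
-- def najpoti(a, b, sez=[],tp=[]):
--     """Izpiše vse najkrajše poti med a in b na hiperkocki"""
--     r = len(a)
--     if a == b: #Če smo na koncu neke najkrajše poti (v b), jo dodamo seznamu
--         sez.append(tp.copy())
--         return sez
--     if tp == []: #Če poti še nismo začeli, ji dodamo začetek (a)
--         tp.append(a)
--     for i in range(r):
--         if a[i] != b[i]: #Pogledamo v katerem bitu se začetek in konec razlikujeta
--             temp = a[:i]+b[i] + a[i+1:] #Sestavimo vozlišče, ki se na tem bitu ujema z b, sicer pa z a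
--             # Vozlišče temp je za 1 bližje koncu, kot pa trenutni a
--             tp.append(temp) #temp dodamo poti in poženemo funkcijo za iskanje poti med temp in b
--             sez = najpoti(temp, b, sez, tp)
--             #temp odstranimo s poti, zato da lahko brez motenj obravnavamo še situacije za ostale i
--             tp.pop()
--     return sez
-- ===== SOURCE B (Python) =====
-- def _perms(l):
--     """All permutations of l in the same (lexicographic-by-position) order
--     as picking the remaining elements left to right."""
--     if not l:
--         return [[]]
--     out = []
--     for x in l:
--         rest = l.copy()
--         rest.remove(x)
--         for p in _perms(rest):
--             out.append([x] + p)
--     return out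
--
-- def najpoti(a, b, sez=[], tp=[]):
--     """Izpiše vse najkrajše poti med a in b na hiperkocki"""
--     if a == b:
--         sez.append(tp.copy())
--         return sez
--     if tp == []:
--         tp.append(a)
--     if len(a) == len(b):
--         diffs = [i for i in range(len(a)) if a[i] != b[i]]
--         for perm in _perms(diffs):
--             cur = a
--             path = tp.copy()
--             for i in perm:
--                 cur = cur[:i] + b[i] + cur[i+1:]
--                 path.append(cur)
--             sez.append(path)
--     return sez
-- ===== Notes on version B (the rewrite author's own statement) =====
-- stated objective: alternative
-- what changed: A enumerates shortest paths by recursive backtracking that mutates a shared path list (append/recurse/pop); B instead collects the differing bit positions once and materialises each path directly from every permutation of that index list (generated in the same lexicographic order), with no recursion over vertices and no backtracking.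
import Mathlib
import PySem

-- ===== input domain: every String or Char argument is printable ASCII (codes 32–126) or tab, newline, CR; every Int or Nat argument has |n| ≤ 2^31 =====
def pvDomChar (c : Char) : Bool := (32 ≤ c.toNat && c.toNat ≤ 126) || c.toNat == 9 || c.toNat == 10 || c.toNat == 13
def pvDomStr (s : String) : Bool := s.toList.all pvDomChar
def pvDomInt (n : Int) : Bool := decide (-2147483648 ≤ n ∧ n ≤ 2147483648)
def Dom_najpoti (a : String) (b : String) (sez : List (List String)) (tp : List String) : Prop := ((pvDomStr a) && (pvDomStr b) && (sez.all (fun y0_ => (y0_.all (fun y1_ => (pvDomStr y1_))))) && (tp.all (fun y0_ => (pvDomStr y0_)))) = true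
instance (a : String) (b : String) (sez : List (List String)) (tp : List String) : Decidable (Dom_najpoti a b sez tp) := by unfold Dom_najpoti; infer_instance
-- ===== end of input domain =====

-- B replaces A's mutating backtracking recursion by enumerating permutations of the differing
-- index positions and materialising each path directly (alternative algorithm, same cost);
-- equivalence is about the RETURN value (both Pythons mutate sez/tp identically anyway).


-- ===== PORT A =====
-- a[:i] + c + a[i+1:] for a natural index i (both Pythons build vertices with this expression;
-- PySem.Chars.slice with natural bounds is take/drop, see PySem.Chars.slice_to_natCast/slice_from_natCast)
def pyFlip (a : String) (i : Nat) (c : Char) : String :=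
  String.ofList (a.toList.take i ++ [c] ++ a.toList.drop (i + 1))

-- [i for i in range(len(a)) if a[i] != b[i]]  (B's comprehension; also A's termination measure)
def dlist (a b : String) : List Nat :=
  (List.range a.toList.length).filter (fun i => a.toList[i]? ≠ b.toList[i]?)

-- termination helper: filtering with a predicate that is smaller at one member is strictly shorter
theorem filter_length_mono {p q : Nat → Bool} (l : List Nat) (h : ∀ x ∈ l, q x = true → p x = true) :
    (l.filter q).length ≤ (l.filter p).length := by
  induction l with
  | nil => simp
  | cons x xs ih =>
    have hx := h x (by simp)
    have ih' := ih (fun a ha => h a (by simp [ha]))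
    by_cases hp : p x <;> by_cases hq : q x <;> simp [hp, hq] <;> first | omega | exact absurd (hx hq) (by simp [hp])

theorem filter_lt_of_witness {p q : Nat → Bool} (l : List Nat) (i : Nat) (hil : i ∈ l)
    (hpi : p i = true) (hqi : q i = false) (hother : ∀ j ∈ l, j ≠ i → q j = p j) :
    (l.filter q).length < (l.filter p).length := by
  induction l with
  | nil => cases hil
  | cons x xs ih =>
    by_cases hxi : x = i
    · subst hxi
      have hle : (xs.filter q).length ≤ (xs.filter p).length := by
        apply filter_length_mono
        intro a ha hqa
        by_cases hax : a = x
        · subst hax; rw [hqa] at hqi; cases hqi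
        · rw [hother a (by simp [ha]) hax] at hqa; exact hqa
      simp [hpi, hqi]; omega
    · have hixs : i ∈ xs := by
        rcases List.mem_cons.mp hil with h | h
        · exact absurd h.symm hxi
        · exact h
      have hqp : q x = p x := hother x (by simp) hxi
      have := ih hixs (fun j hj hne => hother j (by simp [hj]) hne)
      clear hil
      by_cases hp : p x <;> simp [hp, hqp ▸ hp, hqp] <;> omega

theorem pyFlip_toList (a : String) (i : Nat) (c : Char) (hi : i < a.toList.length) :
    (pyFlip a i c).toList = a.toList.set i c := by
  simp only [pyFlip]
  rw [List.set_eq_take_append_cons_drop, if_pos hi]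
  simp

theorem flip_decreases (a b : String) (i : Nat) (c : Char) (hi : i < a.toList.length)
    (hb : b.toList[i]? = some c) (hne : a.toList[i]? ≠ some c) :
    (dlist (pyFlip a i c) b).length < (dlist a b).length := by
  unfold dlist
  rw [pyFlip_toList a i c hi, List.length_set]
  apply filter_lt_of_witness _ i (List.mem_range.mpr hi)
  · simp [hb, hne]
  · have hi' : i < a.length := by simpa using hi
    simp [List.getElem?_set, hi, hi', hb]
  · intro j _ hji
    have hij : i ≠ j := fun h => hji h.symm
    simp [List.getElem?_set, hij]

mutual
-- literal port of A: recursive backtracking; tp.append/recurse/tp.pop becomes passing tp ++ [temp]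
def najpoti (a : String) (b : String) (sez : List (List String)) (tp : List String) : List (List String) :=
  if a = b then
    sez ++ [tp]                                       -- sez.append(tp.copy())
  else
    let tp' := if tp = [] then tp ++ [a] else tp      -- if tp == []: tp.append(a)
    najpotiFor a b (List.range a.toList.length) sez tp'   -- for i in range(r)
termination_by ((dlist a b).length, a.toList.length + 1)
decreasing_by exact Prod.Lex.right _ (by simp)

def najpotiFor (a : String) (b : String) (idxs : List Nat) (sez : List (List String)) (tp : List String) : List (List String) :=
  match idxs with
  | [] => sez
  | i :: rest =>
    match ha : a.toList[i]?, hb : b.toList[i]? with   -- a[i], b[i]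
    | some ca, some cb =>
      if ca ≠ cb then
        let temp := pyFlip a i cb                     -- temp = a[:i] + b[i] + a[i+1:]
        najpotiFor a b rest (najpoti temp b sez (tp ++ [temp])) tp
      else najpotiFor a b rest sez tp
    | _, _ => sez                                     -- IndexError in Python, outside Pre_najpoti
termination_by ((dlist a b).length, idxs.length)
decreasing_by
  · exact Prod.Lex.left _ _ (flip_decreases a b i cb
      (List.getElem?_eq_some_iff.mp ha |>.1) hb (by simp [ha]; exact fun h => (by simpa [h] using ‹ca ≠ cb›)))
  · exact Prod.Lex.right _ (by simp)
  · exact Prod.Lex.right _ (by simp)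
end

-- ===== PORT B =====
-- all permutations of l, in the order produced by picking each remaining element left to right
-- (itertools order for distinct elements; `remove`/`erase` drops the first occurrence)
def perms (l : List Nat) : List (List Nat) :=
  if h : l = [] then [[]]
  else l.attach.flatMap (fun x => (perms (l.erase x.1)).map (fun p => x.1 :: p))
termination_by l.length
decreasing_by
  rw [List.length_erase_of_mem x.2]
  have : l.length ≠ 0 := fun hl => h (List.length_eq_zero_iff.mp hl)
  omega

-- one step of B's inner loop: cur = cur[:i] + b[i] + cur[i+1:]; path.append(cur)
def pstep (b : String) (st : String × List String) (i : Nat) : String × List String :=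
  match b.toList[i]? with
  | some c => (pyFlip st.1 i c, st.2 ++ [pyFlip st.1 i c])
  | none => st                                        -- unreachable in B (i < len b there)

def najpoti_alt (a : String) (b : String) (sez : List (List String)) (tp : List String) : List (List String) :=
  if a = b then sez ++ [tp]
  else
    let tp' := if tp = [] then tp ++ [a] else tp
    if a.toList.length = b.toList.length then
      sez ++ (perms (dlist a b)).map (fun perm => (perm.foldl (pstep b) (a, tp')).2)
    else sez                                          -- no equal-length path exists

-- ===== PRECONDITION & SPEC =====
-- Pre_ excludes exactly the inputs where Python A raises IndexError (b[i] for i >= len(b)):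
-- a != b with len(b) < len(a).
def Pre_najpoti (a : String) (b : String) (sez : List (List String)) (tp : List String) : Prop :=
  a = b ∨ a.toList.length ≤ b.toList.length
instance (a : String) (b : String) (sez : List (List String)) (tp : List String) : Decidable (Pre_najpoti a b sez tp) := by unfold Pre_najpoti; infer_instance

def pvWitness_najpoti : String × String × List (List String) × List String := ("01", "10", [], [])

def Spec_najpoti (a : String) (b : String) (sez : List (List String)) (tp : List String) (out : List (List String)) : Prop := out = najpoti_alt a b sez tp
instance (a : String) (b : String) (sez : List (List String)) (tp : List String) (out : List (List String)) : Decidable (Spec_najpoti a b sez tp out) := by unfold Spec_najpoti; infer_instance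

-- ===== CLAIM (what is proved, stated in full; the proofs are below) =====
def Claim_equal_najpoti : Prop := ∀ (a : String) (b : String) (sez : List (List String)) (tp : List String), Dom_najpoti a b sez tp → Pre_najpoti a b sez tp → Spec_najpoti a b sez tp (najpoti a b sez tp)

-- ===== LEMMAS AND PROOFS =====

-- the set of paths contributed by choosing differing index i first
def branch (a b : String) (tp : List String) (i : Nat) : List (List String) :=
  match b.toList[i]? with
  | some c => (perms (dlist (pyFlip a i c) b)).map
      (fun perm => (perm.foldl (pstep b) (pyFlip a i c, tp ++ [pyFlip a i c])).2)
  | none => []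

theorem dlist_flip (a b : String) (i : Nat) (c : Char) (hi : i < a.toList.length)
    (hb : b.toList[i]? = some c) (hne : a.toList[i]? ≠ some c) :
    dlist (pyFlip a i c) b = (dlist a b).erase i := by
  have hnd : (dlist a b).Nodup := List.Nodup.filter _ List.nodup_range
  rw [List.Nodup.erase_eq_filter hnd i]
  unfold dlist
  rw [pyFlip_toList a i c hi, List.length_set, List.filter_filter]
  apply List.filter_congr
  intro j hj
  have hjlt : j < a.toList.length := List.mem_range.mp hj
  by_cases hji : j = i
  · subst hji
    have hj' : j < a.length := by simpa using hjlt
    simp [List.getElem?_set, hj', hb]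
  · have hij : i ≠ j := fun h => hji h.symm
    simp [List.getElem?_set, hij, hji]

theorem dlist_nil_iff (a b : String) (hlen : a.toList.length = b.toList.length) :
    dlist a b = [] ↔ a = b := by
  constructor
  · intro h
    have hall := List.filter_eq_nil_iff.mp h
    have htl : a.toList = b.toList := by
      apply List.ext_getElem?
      intro j
      by_cases hj : j < a.toList.length
      · have := hall j (List.mem_range.mpr hj)
        simpa using this
      · rw [List.getElem?_eq_none (by omega), List.getElem?_eq_none (by omega)]
    exact String.toList_inj.mp htl
  · rintro rfl
    unfold dlist
    apply List.filter_eq_nil_iff.mpr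
    intro j _
    simp

theorem flatMap_filter_if {α : Type} (l : List Nat) (p : Nat → Prop) [DecidablePred p] (f : Nat → List α) :
    (l.flatMap (fun i => if p i then f i else [])) = (l.filter (fun i => decide (p i))).flatMap f := by
  induction l with
  | nil => simp
  | cons x xs ih => by_cases h : p x <;> simp [h, ih]

theorem najpoti_len_ne (n : Nat) : ∀ (a b : String), (dlist a b).length = n →
    a.toList.length ≠ b.toList.length → ∀ sez tp, najpoti a b sez tp = sez := by
  induction n using Nat.strong_induction_on with
  | _ n IH =>
  intro a b hn hlen sez tp
  have hab : a ≠ b := fun h => hlen (by rw [h])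
  rw [najpoti, if_neg hab]
  have loop : ∀ idxs, (∀ i ∈ idxs, i < a.toList.length) → ∀ s tq,
      najpotiFor a b idxs s tq = s := by
    intro idxs
    induction idxs with
    | nil => intro _ s tq; rw [najpotiFor]
    | cons i rest ihr =>
      intro hmem s tq
      have hi : i < a.toList.length := hmem i (by simp)
      rw [najpotiFor]
      split
      next ca' cb' heqa heqb =>
        split_ifs with hnecc
        · have hlen' : (pyFlip a i cb').toList.length = a.toList.length := by
            rw [pyFlip_toList a i cb' hi, List.length_set]
          have hanec : a.toList[i]? ≠ some cb' := by
            rw [heqa]; simpa using hnecc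
          have hdec := flip_decreases a b i cb' hi heqb hanec
          show najpotiFor a b rest (najpoti (pyFlip a i cb') b s (tq ++ [pyFlip a i cb'])) tq = s
          rw [IH _ (hn ▸ hdec) (pyFlip a i cb') b rfl (by rw [hlen']; exact hlen) s _]
          exact ihr (fun j hj => hmem j (by simp [hj])) s tq
        · exact ihr (fun j hj => hmem j (by simp [hj])) s tq
      next => rfl
  exact loop _ (fun j hj => List.mem_range.mp hj) sez _

theorem najpoti_main (n : Nat) : ∀ (a b : String), a.toList.length = b.toList.length →
    (dlist a b).length = n → ∀ sez tp, tp ≠ [] →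
    najpoti a b sez tp = sez ++ (perms (dlist a b)).map (fun perm => (perm.foldl (pstep b) (a, tp)).2) := by
  induction n using Nat.strong_induction_on with
  | _ n IH =>
  intro a b hlen hn sez tp htp
  by_cases hab : a = b
  · subst hab
    rw [najpoti, if_pos rfl]
    have hd : dlist a a = [] := (dlist_nil_iff a a rfl).mpr rfl
    rw [hd, perms]
    simp
  · have hdne : dlist a b ≠ [] := fun h => hab ((dlist_nil_iff a b hlen).mp h)
    rw [najpoti, if_neg hab]
    rw [if_neg htp]
    have loop : ∀ idxs, (∀ i ∈ idxs, i < a.toList.length) → ∀ s,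
        najpotiFor a b idxs s tp =
          s ++ idxs.flatMap (fun i => if a.toList[i]? ≠ b.toList[i]? then branch a b tp i else []) := by
      intro idxs
      induction idxs with
      | nil => intro _ s; rw [najpotiFor]; simp
      | cons i rest ihr =>
        intro hmem s
        have hi : i < a.toList.length := hmem i (by simp)
        have hib : i < b.toList.length := hlen ▸ hi
        obtain ⟨ca, hca⟩ : ∃ ca, a.toList[i]? = some ca := ⟨_, List.getElem?_eq_getElem hi⟩
        obtain ⟨cb, hcb⟩ : ∃ cb, b.toList[i]? = some cb := ⟨_, List.getElem?_eq_getElem hib⟩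
        rw [najpotiFor]
        split
        next ca' cb' heqa heqb =>
          split_ifs with hne
          · have hlen' : (pyFlip a i cb').toList.length = b.toList.length := by
              rw [pyFlip_toList a i cb' hi, List.length_set]; exact hlen
            have hanec : a.toList[i]? ≠ some cb' := by rw [heqa]; simpa using hne
            have hdec := flip_decreases a b i cb' hi heqb hanec
            show najpotiFor a b rest (najpoti (pyFlip a i cb') b s (tp ++ [pyFlip a i cb'])) tp = _
            rw [IH _ (hn ▸ hdec) (pyFlip a i cb') b hlen' rfl s (tp ++ [pyFlip a i cb']) (by simp)]
            rw [ihr (fun j hj => hmem j (by simp [hj])) _]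
            rw [List.flatMap_cons]
            have hcond : a.toList[i]? ≠ b.toList[i]? := by rw [heqa, heqb]; simpa using hne
            rw [if_pos hcond]
            have hbr : branch a b tp i = (perms (dlist (pyFlip a i cb') b)).map
                (fun perm => (perm.foldl (pstep b) (pyFlip a i cb', tp ++ [pyFlip a i cb'])).2) := by
              unfold branch
              rw [heqb]
            rw [hbr, List.append_assoc]
          · rw [ihr (fun j hj => hmem j (by simp [hj])) s, List.flatMap_cons]
            have hcond : ¬ (a.toList[i]? ≠ b.toList[i]?) := by
              rw [heqa, heqb]
              simp only [ne_eq, not_not] at hne ⊢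
              exact congrArg some hne
            rw [if_neg hcond]
            simp
        next hno =>
          exact absurd (hno ca cb hca hcb) (fun h => h)
    rw [loop (List.range a.toList.length) (fun j hj => List.mem_range.mp hj) sez]
    congr 1
    rw [flatMap_filter_if]
    show (dlist a b).flatMap (branch a b tp) = _
    rw [perms, dif_neg hdne]
    rw [List.map_flatMap]
    conv_lhs => rw [← List.attach_map_subtype_val (dlist a b)]
    rw [List.flatMap_map]
    apply List.flatMap_congr
    intro x _
    obtain ⟨i, hmem⟩ : ∃ i, i = x.1 ∧ True := ⟨x.1, rfl, trivial⟩
    have hxd : x.1 ∈ dlist a b := x.2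
    have hxr := List.mem_filter.mp hxd
    have hi : x.1 < a.toList.length := List.mem_range.mp hxr.1
    have hpne : a.toList[x.1]? ≠ b.toList[x.1]? := by simpa using hxr.2
    have hib : x.1 < b.toList.length := hlen ▸ hi
    obtain ⟨cb, hcb⟩ : ∃ cb, b.toList[x.1]? = some cb := ⟨_, List.getElem?_eq_getElem hib⟩
    have hne' : a.toList[x.1]? ≠ some cb := by rw [← hcb]; exact hpne
    unfold branch
    rw [hcb]
    dsimp only
    rw [dlist_flip a b x.1 cb hi hcb hne', List.map_map]
    congr 1
    funext p'
    simp only [Function.comp_apply, List.foldl_cons]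
    have hps : pstep b (a, tp) x.1 = (pyFlip a x.1 cb, tp ++ [pyFlip a x.1 cb]) := by
      unfold pstep; rw [hcb]
    rw [hps]

-- ===== VERDICT (by name: the statement is the Claim_ definition above) =====
theorem najpoti_spec : Claim_equal_najpoti := by
  unfold Claim_equal_najpoti
  intro a b sez tp _ hpre
  unfold Spec_najpoti
  by_cases hab : a = b
  · subst hab
    rw [najpoti, if_pos rfl]
    unfold najpoti_alt
    rw [if_pos rfl]
  · have hle : a.toList.length ≤ b.toList.length := by
      rcases hpre with h | h
      · exact absurd h hab
      · exact h
    by_cases heq : a.toList.length = b.toList.length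
    · have htpne : (if tp = [] then tp ++ [a] else tp) ≠ [] := by
        by_cases h : tp = [] <;> simp [h]
      have h1 : najpoti a b sez tp = najpoti a b sez (if tp = [] then tp ++ [a] else tp) := by
        rw [najpoti, najpoti, if_neg hab, if_neg hab]
        by_cases h : tp = [] <;> simp [h]
      rw [h1, najpoti_main ((dlist a b).length) a b heq rfl sez _ htpne]
      unfold najpoti_alt
      rw [if_neg hab]
      simp only [if_pos heq]
    · rw [najpoti_len_ne ((dlist a b).length) a b rfl heq sez tp]
      unfold najpoti_alt
      rw [if_neg hab]
      simp only [if_neg heq]
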